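-- pv_equiv track=rewrite | github.com/HCID274/MC_Servant | scripts/build_knowledge_base.py | _build_reverse_index
-- ===== SOURCE A (Python) =====
-- from typing import Dict, List, Set, Optional, Any, Tuple
--
-- def _build_reverse_index(tags: Dict[str, List[str]]) -> Dict[str, List[str]]:
--     """构建 ID → Tags 反向索引"""
--     result: Dict[str, Set[str]] = {}
--
--     for tag, items in tags.items():
--         for item in items:
--             if item not in result:
--                 result[item] = set()
--             result[item].add(tag)
--
--     return {k: sorted(v) for k, v in result.items()}
-- ===== SOURCE B (Python) =====
-- from typing import Dict, List
--
-- def _build_reverse_index(tags: Dict[str, List[str]]) -> Dict[str, List[str]]: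
--     """构建 ID → Tags 反向索引"""
--     seen = set()
--     order = []
--     for items in tags.values():
--         for item in items:
--             if item not in seen:
--                 seen.add(item)
--                 order.append(item)
--     return {item: sorted(t for t, its in tags.items() if item in its)
--             for item in order}
-- ===== Notes on version B (the rewrite author's own statement) =====
-- stated objective: alternative
-- what changed: A accumulates a dict of tag-sets per item in one pass; B instead first collects the items in first-appearance order, then computes each item's tag list by a direct scan of the tag dict (filter tags whose item list contains the item), with no per-item set accumulation.
import Mathlib
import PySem

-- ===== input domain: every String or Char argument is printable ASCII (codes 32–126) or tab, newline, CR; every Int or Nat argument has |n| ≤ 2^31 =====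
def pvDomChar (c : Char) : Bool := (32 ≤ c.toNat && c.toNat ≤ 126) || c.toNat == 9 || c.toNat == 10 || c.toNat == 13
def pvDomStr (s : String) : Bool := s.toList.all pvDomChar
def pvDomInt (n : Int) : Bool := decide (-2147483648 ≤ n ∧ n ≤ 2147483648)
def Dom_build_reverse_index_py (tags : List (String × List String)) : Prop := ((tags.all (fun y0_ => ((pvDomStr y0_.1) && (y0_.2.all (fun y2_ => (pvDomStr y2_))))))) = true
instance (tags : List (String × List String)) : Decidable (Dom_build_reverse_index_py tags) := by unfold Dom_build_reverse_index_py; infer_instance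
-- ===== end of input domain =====

-- B builds the reverse index by a per-item rescan of the tag dict instead of A's dict-of-sets accumulation; objective: alternative decomposition (same results, not faster).

-- ===== PORT A =====
-- one inner-loop body of A: 'if item not in result: result[item] = set(); result[item].add(tag)'
def pvStepA (tag : String) (r : PySem.Dict String (PySem.Set String)) (item : String) :
    PySem.Dict String (PySem.Set String) :=
  let r := if r.contains item then r else r.insert item PySem.Set.empty
  r.modify item [] (fun s => PySem.Set.add s tag)

def build_reverse_index_py (tags : List (String × List String)) : List (String × List String) :=
  let result : PySem.Dict String (PySem.Set String) :=
    tags.foldl (fun r p => p.2.foldl (pvStepA p.1) r) PySem.Dict.empty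
  (result.items.map (fun kv => (kv.1, PySem.List.sorted kv.2 (fun x => x) false)))

-- ===== PORT B =====
def build_reverse_index_py_alt (tags : List (String × List String)) : List (String × List String) :=
  let so : PySem.Set String × List String :=
    tags.foldl (fun so p =>
      p.2.foldl (fun (so : PySem.Set String × List String) item =>
        if PySem.Set.contains so.1 item then so
        else (PySem.Set.add so.1 item, so.2 ++ [item])) so)
      (PySem.Set.empty, [])
  so.2.map (fun item =>
    (item, PySem.List.sorted ((tags.filter (fun p => p.2.contains item)).map Prod.fst) (fun x => x) false))

-- ===== PRECONDITION & SPEC =====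
-- Pre_ says the association list really denotes a Python dict: its keys are distinct.
-- (A duplicate-keyed list corresponds to no dict input of the Python function, whose argument is dict[str, list[str]].)
def Pre_build_reverse_index_py (tags : List (String × List String)) : Prop :=
  (tags.map Prod.fst).Nodup
instance (tags : List (String × List String)) : Decidable (Pre_build_reverse_index_py tags) := by
  unfold Pre_build_reverse_index_py; infer_instance

def pvWitness_build_reverse_index_py : (List (String × List String)) :=
  [("b", ["x", "y", "x"]), ("a", ["y"])]

def Spec_build_reverse_index_py (tags : List (String × List String)) (out : List (String × List String)) : Prop := out = build_reverse_index_py_alt tags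
instance (tags : List (String × List String)) (out : List (String × List String)) : Decidable (Spec_build_reverse_index_py tags out) := by unfold Spec_build_reverse_index_py; infer_instance

-- ===== CLAIM (what is proved, stated in full; the proofs are below) =====
def Claim_equal_build_reverse_index_py : Prop := ∀ (tags : List (String × List String)), Dom_build_reverse_index_py tags → Pre_build_reverse_index_py tags → Spec_build_reverse_index_py tags (build_reverse_index_py tags)

-- ===== LEMMAS AND PROOFS =====

theorem pvStepA_getD (tag : String) (r : PySem.Dict String (PySem.Set String)) (item k : String) :
    (pvStepA tag r item).getD k [] =
      if k = item then PySem.Set.add (r.getD item []) tag else r.getD k [] := by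
  unfold pvStepA
  by_cases hc : r.contains item = true
  · rw [if_pos hc, PySem.Dict.getD_modify]
  · simp only [Bool.not_eq_true] at hc
    rw [if_neg (by simp [hc]), PySem.Dict.getD_modify]
    by_cases hk : k = item
    · subst hk
      rw [if_pos rfl, if_pos rfl, PySem.Dict.getD_insert_self,
        PySem.Dict.getD_of_not_contains r _ hc]
      rfl
    · rw [if_neg hk, if_neg hk, PySem.Dict.getD_insert_of_ne _ _ _ hk]

theorem pvStepA_keys (tag : String) (r : PySem.Dict String (PySem.Set String)) (item : String) :
    (pvStepA tag r item).keys = PySem.Set.add r.keys item := by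
  unfold pvStepA
  by_cases hc : r.contains item = true
  · have hm : item ∈ r.keys := (PySem.Dict.contains_iff_mem_keys r item).mp hc
    have hadd : PySem.Set.add r.keys item = r.keys := by
      simp [PySem.Set.add, PySem.Set.contains, hm]
    rw [if_pos hc, PySem.Dict.keys_modify, PySem.Dict.keys_insert_of_contains r _ hc, hadd]
  · simp only [Bool.not_eq_true] at hc
    have hm : item ∉ r.keys := fun h => by
      simp [(PySem.Dict.contains_iff_mem_keys r item).mpr h] at hc
    rw [if_neg (by simp [hc]), PySem.Dict.keys_modify, PySem.Dict.insert_insert_self,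
      PySem.Dict.keys_insert_of_not_contains r _ hc]
    simp [PySem.Set.add, PySem.Set.contains, hm]

theorem pv_innerA_keys (tag : String) (items : List String)
    (r : PySem.Dict String (PySem.Set String)) :
    (items.foldl (pvStepA tag) r).keys = PySem.Set.update r.keys items := by
  induction items generalizing r with
  | nil => simp [PySem.Set.update]
  | cons x xs ih =>
    simp only [List.foldl_cons, ih, pvStepA_keys]
    rfl

theorem pv_innerA_getD (tag k : String) (items : List String)
    (r : PySem.Dict String (PySem.Set String)) :
    (items.foldl (pvStepA tag) r).getD k [] =
      if items.contains k then PySem.Set.add (r.getD k []) tag else r.getD k [] := by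
  induction items generalizing r with
  | nil => simp
  | cons x xs ih =>
    simp only [List.foldl_cons, ih, pvStepA_getD]
    by_cases hk : k = x
    · subst hk
      by_cases hx : xs.contains k = true
      · simp_all
      · simp_all
    · simp [hk]

theorem pv_outerA_keys (tags : List (String × List String))
    (r : PySem.Dict String (PySem.Set String)) :
    ((tags.foldl (fun r p => p.2.foldl (pvStepA p.1) r) r).keys) =
      tags.foldl (fun s p => PySem.Set.update s p.2) r.keys := by
  induction tags generalizing r with
  | nil => rfl
  | cons p ps ih => simp only [List.foldl_cons, ih, pv_innerA_keys]

theorem pv_outerA_getD (k : String) (tags : List (String × List String))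
    (r : PySem.Dict String (PySem.Set String)) :
    (tags.foldl (fun r p => p.2.foldl (pvStepA p.1) r) r).getD k [] =
      tags.foldl (fun v p => if p.2.contains k then PySem.Set.add v p.1 else v) (r.getD k []) := by
  induction tags generalizing r with
  | nil => rfl
  | cons p ps ih => simp only [List.foldl_cons, ih, pv_innerA_getD]

theorem pv_fold_update_nodup (tags : List (String × List String)) (s : PySem.Set String)
    (h : s.Nodup) : (tags.foldl (fun s p => PySem.Set.update s p.2) s).Nodup := by
  induction tags generalizing s with
  | nil => simpa using h
  | cons p ps ih =>
    simp only [List.foldl_cons]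
    exact ih _ (PySem.Set.nodup_update s p.2 h)

theorem pv_tagfold_eq_filter (k : String) (tags : List (String × List String)) (v : List String)
    (hdisj : ∀ t ∈ v, t ∉ tags.map Prod.fst) (hnd : (tags.map Prod.fst).Nodup) :
    tags.foldl (fun v p => if p.2.contains k then PySem.Set.add v p.1 else v) v =
      v ++ (tags.filter (fun p => p.2.contains k)).map Prod.fst := by
  induction tags generalizing v with
  | nil => simp
  | cons p ps ih =>
    simp only [List.map_cons, List.nodup_cons] at hnd
    by_cases hc : p.2.contains k = true
    · have hpv : p.1 ∉ v := fun hmem => (hdisj p.1 hmem) (by simp)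
      have hadd : PySem.Set.add v p.1 = v ++ [p.1] := by
        simp [PySem.Set.add, PySem.Set.contains, hpv]
      rw [List.foldl_cons, if_pos hc, hadd,
        ih (v ++ [p.1])
          (by
            intro t ht
            rcases List.mem_append.mp ht with h | h
            · exact fun hm => (hdisj t h) (by simp [hm])
            · simp only [List.mem_singleton] at h; subst h; exact hnd.1)
          hnd.2,
        List.filter_cons_of_pos (by simpa using hc), List.map_cons]
      simp
    · rw [List.foldl_cons, if_neg hc, List.filter_cons_of_neg (by simpa using hc)]
      exact ih v (fun t ht hm => (hdisj t ht) (by simp [hm])) hnd.2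

theorem pv_innerB (items : List String) (s : PySem.Set String) :
    items.foldl (fun (so : PySem.Set String × List String) item =>
        if PySem.Set.contains so.1 item then so
        else (PySem.Set.add so.1 item, so.2 ++ [item])) (s, s) =
      (PySem.Set.update s items, PySem.Set.update s items) := by
  induction items generalizing s with
  | nil => simp [PySem.Set.update]
  | cons x xs ih =>
    simp only [List.foldl_cons]
    by_cases hc : PySem.Set.contains s x = true
    · have h1 : PySem.Set.update s (x :: xs) = PySem.Set.update s xs := by
        show PySem.Set.update (PySem.Set.add s x) xs = PySem.Set.update s xs
        have hm : x ∈ s := by simpa [PySem.Set.contains] using hc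
        rw [show PySem.Set.add s x = s by simp [PySem.Set.add, PySem.Set.contains, hm]]
      rw [if_pos hc, h1]
      exact ih s
    · have hm : x ∉ s := by simpa [PySem.Set.contains] using hc
      have hadd : PySem.Set.add s x = s ++ [x] := by simp [PySem.Set.add, PySem.Set.contains, hm]
      have h2 : PySem.Set.update s (x :: xs) = PySem.Set.update (s ++ [x]) xs := by
        show PySem.Set.update (PySem.Set.add s x) xs = _
        rw [hadd]
      rw [if_neg hc, hadd, h2]
      exact ih (s ++ [x])

theorem pv_outerB (tags : List (String × List String)) (s : PySem.Set String) :
    tags.foldl (fun so p =>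
        p.2.foldl (fun (so : PySem.Set String × List String) item =>
          if PySem.Set.contains so.1 item then so
          else (PySem.Set.add so.1 item, so.2 ++ [item])) so) (s, s) =
      (tags.foldl (fun s p => PySem.Set.update s p.2) s,
       tags.foldl (fun s p => PySem.Set.update s p.2) s) := by
  induction tags generalizing s with
  | nil => rfl
  | cons p ps ih => simp only [List.foldl_cons, pv_innerB, ih]

-- ===== VERDICT (by name: the statement is the Claim_ definition above) =====
theorem build_reverse_index_py_spec : Claim_equal_build_reverse_index_py := by
  intro tags _hdom hpre
  unfold Spec_build_reverse_index_py build_reverse_index_py build_reverse_index_py_alt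
  simp only [PySem.Set.empty]
  rw [pv_outerB]
  have hnd : ((tags.foldl (fun r p => p.2.foldl (pvStepA p.1) r) PySem.Dict.empty).keys).Nodup := by
    rw [pv_outerA_keys]
    simp only [PySem.Dict.keys_empty]
    exact pv_fold_update_nodup tags [] List.nodup_nil
  rw [PySem.Dict.items_eq_map_keys _ hnd ([] : PySem.Set String), List.map_map,
    pv_outerA_keys]
  simp only [PySem.Dict.keys_empty]
  apply List.map_congr_left
  intro k _hk
  simp only [Function.comp]
  rw [pv_outerA_getD, PySem.Dict.getD_empty,
    pv_tagfold_eq_filter k tags [] (by simp) hpre]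
  simp
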